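-- pv_equiv track=rewrite | github.com/cky332/16 | code_transform.py | reorder_imports
-- ===== SOURCE A (Python) =====
-- def reorder_imports(code):
--     """Sort import statements alphabetically."""
--     lines = code.split('\n')
--     import_lines = []
--     other_lines = []
--     import_section_done = False
--
--     for line in lines:
--         if not import_section_done and (line.strip().startswith('import ') or
--                                          line.strip().startswith('from ')):
--             import_lines.append(line)
--         else:
--             if import_lines and not line.strip():
--                 continue  # skip blank line after imports
--             import_section_done = True
--             other_lines.append(line)
--
--     if import_lines:
--         import_lines.sort()
--         return '\n'.join(import_lines + [''] + other_lines)
--     return code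
-- ===== SOURCE B (Python) =====
-- def reorder_imports(code):
--     """Sort import statements alphabetically."""
--     lines = code.split('\n')
--     if not lines[0].strip().startswith(('import ', 'from ')):
--         return code
--     k = next((i for i, l in enumerate(lines)
--               if l.strip() and not l.strip().startswith(('import ', 'from '))),
--              len(lines))
--     head = sorted(l for l in lines[:k] if l.strip())
--     tail = [l for l in lines[k:] if l.strip()]
--     return '\n'.join(head + [''] + tail)
-- ===== Notes on version B (the rewrite author's own statement) =====
-- stated objective: alternative
-- what changed: Replaces A's flag-driven single pass with two growing accumulators by staged passes: an early guard on the first line, computation of a boundary index k (first non-blank non-import line), then slices lines[:k]/lines[k:] each filtered of blank lines, with no mutable scan state at all.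
import Mathlib
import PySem

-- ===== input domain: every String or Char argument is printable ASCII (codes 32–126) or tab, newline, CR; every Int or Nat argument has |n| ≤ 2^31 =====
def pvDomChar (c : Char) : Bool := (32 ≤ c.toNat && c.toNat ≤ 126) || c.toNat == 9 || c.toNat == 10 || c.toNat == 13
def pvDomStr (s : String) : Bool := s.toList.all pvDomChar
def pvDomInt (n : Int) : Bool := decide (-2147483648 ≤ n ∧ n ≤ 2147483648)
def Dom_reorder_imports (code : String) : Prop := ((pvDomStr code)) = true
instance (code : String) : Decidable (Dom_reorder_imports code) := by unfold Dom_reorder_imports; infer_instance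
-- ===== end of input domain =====

-- B replaces A's flag-driven single pass with staged passes: an early guard on the first
-- line, a boundary index k, slices and filters (objective: alternative decomposition).

-- shared helpers: the tests both Pythons make on a line
def pvIsImp (line : String) : Bool :=
  PySem.Str.startswith (PySem.Str.strip line) "import " ||
  PySem.Str.startswith (PySem.Str.strip line) "from "

def pvIsBlank (line : String) : Bool := PySem.Str.strip line == ""

-- ===== PORT A =====
-- loop body of A's for-loop over (import_lines, other_lines, import_section_done)
def pvAStep (st : List String × List String × Bool) (line : String) :
    List String × List String × Bool :=
  match st with
  | (imps, others, done) =>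
    if !done && pvIsImp line then (imps ++ [line], others, done)
    else if !imps.isEmpty && pvIsBlank line then (imps, others, done)
    else (imps, others ++ [line], true)

def reorder_imports (code : String) : String :=
  let lines := (PySem.Str.split? code "\n").getD []
  let r := lines.foldl pvAStep ([], [], false)
  if r.1.isEmpty then code
  else PySem.Str.join "\n" (PySem.List.sorted r.1 (fun x => x.toList) ++ [""] ++ r.2.1)

-- ===== PORT B =====
-- B: guard on lines[0]; k = first index of a non-blank non-import line (len(lines) if none,
-- as Python's next(..., len(lines)) — List.findIdx returns the length when no hit);
-- lines[:k] / lines[k:] as take/drop (k is a nonnegative in-range index), both blank-filtered.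
def reorder_imports_alt (code : String) : String :=
  match (PySem.Str.split? code "\n").getD [] with
  | [] => code  -- unreachable: str.split('\n') never yields an empty list
  | l0 :: rest =>
    if !pvIsImp l0 then code
    else
      let lines := l0 :: rest
      let k := lines.findIdx (fun l => !pvIsBlank l && !pvIsImp l)
      let head := PySem.List.sorted ((lines.take k).filter (fun l => !pvIsBlank l))
        (fun x => x.toList)
      let tail := (lines.drop k).filter (fun l => !pvIsBlank l)
      PySem.Str.join "\n" (head ++ [""] ++ tail)

-- ===== PRECONDITION & SPEC =====
def Spec_reorder_imports (code : String) (out : String) : Prop := out = reorder_imports_alt code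
instance (code : String) (out : String) : Decidable (Spec_reorder_imports code out) := by unfold Spec_reorder_imports; infer_instance

-- ===== CLAIM (what is proved, stated in full; the proofs are below) =====
def Claim_equal_reorder_imports : Prop := ∀ (code : String), Dom_reorder_imports code → Spec_reorder_imports code (reorder_imports code)

-- ===== LEMMAS AND PROOFS =====

-- a blank line is never an import line
lemma pvImp_not_blank {l : String} (h : pvIsBlank l = true) : pvIsImp l = false := by
  unfold pvIsBlank at h
  have hs : PySem.Str.strip l = "" := by exact_mod_cast of_decide_eq_true h
  unfold pvIsImp
  rw [hs]
  decide

-- once the section is done with no imports collected, A appends every remaining line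
lemma pvFold_done_nil (rest : List String) (others : List String) :
    rest.foldl pvAStep ([], others, true) = ([], others ++ rest, true) := by
  induction rest generalizing others with
  | nil => simp
  | cons l t ih =>
    have hs : pvAStep ([], others, true) l = ([], others ++ [l], true) := by
      simp [pvAStep]
    rw [List.foldl_cons, hs, ih]
    simp

-- once the section is done with imports collected, A appends exactly the non-blank remaining lines
lemma pvFold_done (rest : List String) (imps others : List String) (h : imps.isEmpty = false) :
    rest.foldl pvAStep (imps, others, true) =
      (imps, others ++ rest.filter (fun l => !pvIsBlank l), true) := by
  induction rest generalizing others with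
  | nil => simp
  | cons l t ih =>
    by_cases hb : pvIsBlank l = true
    · have hs : pvAStep (imps, others, true) l = (imps, others, true) := by
        simp [pvAStep, h, hb]
      rw [List.foldl_cons, hs, ih, List.filter_cons_of_neg (by simp [hb])]
    · have hs : pvAStep (imps, others, true) l = (imps, others ++ [l], true) := by
        simp [pvAStep, h, hb]
      rw [List.foldl_cons, hs, ih, List.filter_cons_of_pos (by simp [hb])]
      simp

-- while scanning with a nonempty accumulator, A's fold collects the import lines of the
-- blank/import prefix and appends the non-blank lines of the remainder
lemma pvFold_scan (lines : List String) (acc others : List String) (h : acc.isEmpty = false) :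
    (lines.foldl pvAStep (acc, others, false)).1 =
      acc ++ (lines.takeWhile (fun l => pvIsBlank l || pvIsImp l)).filter pvIsImp ∧
    (lines.foldl pvAStep (acc, others, false)).2.1 =
      others ++ (lines.dropWhile (fun l => pvIsBlank l || pvIsImp l)).filter
        (fun l => !pvIsBlank l) := by
  induction lines generalizing acc others with
  | nil => simp
  | cons l t ih =>
    by_cases hi : pvIsImp l = true
    · have hs : pvAStep (acc, others, false) l = (acc ++ [l], others, false) := by
        simp [pvAStep, hi]
      rw [List.foldl_cons, hs]
      obtain ⟨e1, e2⟩ := ih (acc ++ [l]) others (by simp)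
      refine ⟨?_, ?_⟩
      · rw [e1, List.takeWhile_cons_of_pos (by simp [hi]),
          List.filter_cons_of_pos (by simp [hi])]
        simp
      · rw [e2, List.dropWhile_cons_of_pos (by simp [hi])]
    · by_cases hb : pvIsBlank l = true
      · have hs : pvAStep (acc, others, false) l = (acc, others, false) := by
          simp [pvAStep, hi, h, hb]
        rw [List.foldl_cons, hs]
        obtain ⟨e1, e2⟩ := ih acc others h
        refine ⟨?_, ?_⟩
        · rw [e1, List.takeWhile_cons_of_pos (by simp [hb]),
            List.filter_cons_of_neg (by simp [hi])]
        · rw [e2, List.dropWhile_cons_of_pos (by simp [hb])]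
      · have hs : pvAStep (acc, others, false) l = (acc, others ++ [l], true) := by
          simp [pvAStep, hi, h, hb]
        rw [List.foldl_cons, hs, pvFold_done t acc _ h]
        refine ⟨?_, ?_⟩
        · rw [List.takeWhile_cons_of_neg (by simp [hi, hb])]
          simp
        · rw [List.dropWhile_cons_of_neg (by simp [hi, hb]),
            List.filter_cons_of_pos (by simp [hb])]
          simp

-- B's boundary index: takeWhile/dropWhile of the kept predicate are take/drop at findIdx of its negation
lemma pvIdx_take (p : String → Bool) (l : List String) :
    l.takeWhile p = l.take (l.findIdx (fun x => !p x)) ∧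
    l.dropWhile p = l.drop (l.findIdx (fun x => !p x)) := by
  induction l with
  | nil => simp
  | cons a t ih =>
    by_cases hp : p a = true
    · rw [List.takeWhile_cons_of_pos hp, List.dropWhile_cons_of_pos hp,
        List.findIdx_cons]
      simp only [hp, Bool.not_true, cond_false]
      rw [List.take_succ_cons, List.drop_succ_cons, ih.1, ih.2]
      exact ⟨rfl, rfl⟩
    · rw [List.takeWhile_cons_of_neg hp, List.dropWhile_cons_of_neg hp,
        List.findIdx_cons]
      simp [hp]

-- on the blank/import prefix the two filters coincide
lemma pvFilter_eq (t : List String) :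
    ((t.takeWhile (fun l => pvIsBlank l || pvIsImp l)).filter pvIsImp) =
    ((t.takeWhile (fun l => pvIsBlank l || pvIsImp l)).filter (fun l => !pvIsBlank l)) := by
  apply List.filter_congr
  intro x hx
  have hP := List.mem_takeWhile_imp hx
  by_cases hb : pvIsBlank x = true
  · simp [hb, pvImp_not_blank hb]
  · simp only [hb, Bool.false_or] at hP
    simp [hP, hb]

-- ===== VERDICT (by name: the statement is the Claim_ definition above) =====
theorem reorder_imports_spec : Claim_equal_reorder_imports := by
  intro code _
  unfold Spec_reorder_imports reorder_imports reorder_imports_alt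
  cases hL : (PySem.Str.split? code "\n").getD [] with
  | nil => simp
  | cons l0 t =>
    by_cases hi : pvIsImp l0 = true
    · simp only [hi, Bool.not_true, Bool.false_eq_true, if_false]
      have hA : (l0 :: t).foldl pvAStep ([], [], false) = t.foldl pvAStep ([l0], [], false) := by
        rw [List.foldl_cons, show pvAStep ([], [], false) l0 = ([l0], [], false) by
          simp [pvAStep, hi]]
      obtain ⟨e1, e2⟩ := pvFold_scan t [l0] [] (by simp)
      have hk : (l0 :: t).findIdx (fun l => !pvIsBlank l && !pvIsImp l) =
          t.findIdx (fun l => !pvIsBlank l && !pvIsImp l) + 1 := by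
        rw [List.findIdx_cons]
        simp [hi]
      have hb0 : pvIsBlank l0 = false := by
        by_contra hc
        have := pvImp_not_blank (by simpa using hc)
        simp [hi] at this
      have htw := pvIdx_take (fun l => pvIsBlank l || pvIsImp l) t
      have htw' : (fun x => !(pvIsBlank x || pvIsImp x)) =
          (fun l => !pvIsBlank l && !pvIsImp l) := by
        funext x; simp
      rw [htw'] at htw
      rw [hA, e1, e2]
      simp only [hk, List.take_succ_cons, List.drop_succ_cons]
      rw [← htw.1, ← htw.2]
      rw [if_neg (by simp)]
      rw [List.filter_cons_of_pos (by simp [hb0]), pvFilter_eq]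
      simp
    · simp only [hi]
      have hA : (l0 :: t).foldl pvAStep ([], [], false) = ([], [l0] ++ t, true) := by
        rw [List.foldl_cons, show pvAStep ([], [], false) l0 = ([], [l0], true) by
          simp [pvAStep, hi], pvFold_done_nil]
      rw [hA]
      simp
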